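-- pv_equiv track=rewrite | github.com/Catminusminus/algorithms-and-data-structures | src/algorithms_and_data_structures/full_search.py | full_search_1
-- ===== SOURCE A (Python) =====
-- from typing import List, Optional
--
-- def full_search_1(
--     list_a: List[int], list_b: List[int], lower_bound: int
-- ) -> Optional[int]:
--     assert list_a != []
--     assert list_b != []
--
--     sum_value = None
--
--     for elm_a in list_a:
--         for elm_b in list_b:
--             temporary_sum_value = elm_a + elm_b
--             if temporary_sum_value < lower_bound:
--                 continue
--             if sum_value is None or temporary_sum_value < sum_value:
--                 sum_value = temporary_sum_value
--
--     return sum_value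
-- ===== SOURCE B (Python) =====
-- from typing import List, Optional
--
--
-- def full_search_1(
--     list_a: List[int], list_b: List[int], lower_bound: int
-- ) -> Optional[int]:
--     assert list_a != []
--     assert list_b != []
--
--     sorted_b = sorted(list_b)
--     best = None
--
--     for elm_a in list_a:
--         target = lower_bound - elm_a
--         # binary search: smallest index with sorted_b[lo] >= target
--         lo, hi = 0, len(sorted_b)
--         while lo < hi:
--             mid = (lo + hi) // 2
--             if sorted_b[mid] < target:
--                 lo = mid + 1
--             else:
--                 hi = mid
--         if lo < len(sorted_b):
--             candidate = elm_a + sorted_b[lo]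
--             if best is None or candidate < best:
--                 best = candidate
--
--     return best
-- ===== Notes on version B (the rewrite author's own statement) =====
-- stated objective: faster
-- what changed: Replaces the nested scan over all pairs by sorting list_b once and, for each element of list_a, binary-searching the smallest b with a+b >= lower_bound, keeping the running minimum of those candidates.
import Mathlib
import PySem

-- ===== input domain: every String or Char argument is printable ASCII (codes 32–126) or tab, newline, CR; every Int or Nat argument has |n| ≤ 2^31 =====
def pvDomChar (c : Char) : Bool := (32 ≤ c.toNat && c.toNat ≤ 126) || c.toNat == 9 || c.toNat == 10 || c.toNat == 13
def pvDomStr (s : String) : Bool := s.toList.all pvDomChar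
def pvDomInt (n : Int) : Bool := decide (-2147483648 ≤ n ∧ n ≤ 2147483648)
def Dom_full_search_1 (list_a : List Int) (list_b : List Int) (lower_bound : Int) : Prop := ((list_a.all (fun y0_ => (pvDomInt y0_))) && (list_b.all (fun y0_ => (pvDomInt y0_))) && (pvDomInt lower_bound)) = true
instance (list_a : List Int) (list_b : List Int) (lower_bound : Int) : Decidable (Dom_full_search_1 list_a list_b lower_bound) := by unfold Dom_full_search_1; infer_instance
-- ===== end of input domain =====

-- B sorts list_b once and binary-searches per element of list_a instead of A's nested scan over all pairs (objective: faster).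

-- ===== PORT A =====
def full_search_1 (list_a : List Int) (list_b : List Int) (lower_bound : Int) : Option Int :=
  list_a.foldl (fun sum_value elm_a =>
    list_b.foldl (fun sum_value elm_b =>
      let temporary_sum_value := elm_a + elm_b
      if temporary_sum_value < lower_bound then sum_value
      else
        match sum_value with
        | none => some temporary_sum_value
        | some v => if temporary_sum_value < v then some temporary_sum_value else sum_value)
      sum_value)
    none

-- ===== PORT B =====
-- the while loop of Source B; sorted_b[mid] is always in range (0 ≤ lo ≤ mid < hi ≤ len), so getD is exact
def pvBsearch (sorted_b : List Int) (target : Int) (lo hi : Nat) : Nat :=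
  if _h : lo < hi then
    let mid := (lo + hi) / 2
    if sorted_b.getD mid 0 < target then pvBsearch sorted_b target (mid + 1) hi
    else pvBsearch sorted_b target lo mid
  else lo
termination_by hi - lo
decreasing_by all_goals omega

def full_search_1_alt (list_a : List Int) (list_b : List Int) (lower_bound : Int) : Option Int :=
  let sorted_b := PySem.List.sorted list_b (fun x => x) false
  list_a.foldl (fun best elm_a =>
    let target := lower_bound - elm_a
    let lo := pvBsearch sorted_b target 0 sorted_b.length
    if lo < sorted_b.length then
      let candidate := elm_a + sorted_b.getD lo 0
      match best with
      | none => some candidate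
      | some v => if candidate < v then some candidate else best
    else best)
    none

-- ===== PRECONDITION & SPEC =====
-- A asserts both lists nonempty (AssertionError on an empty list), so Pre_ excludes empty lists.
def Pre_full_search_1 (list_a : List Int) (list_b : List Int) (lower_bound : Int) : Prop :=
  list_a ≠ [] ∧ list_b ≠ []
instance (list_a : List Int) (list_b : List Int) (lower_bound : Int) : Decidable (Pre_full_search_1 list_a list_b lower_bound) := by unfold Pre_full_search_1; infer_instance
def pvWitness_full_search_1 : List Int × List Int × Int := ([1, 4], [2, 3], 5)

def Spec_full_search_1 (list_a : List Int) (list_b : List Int) (lower_bound : Int) (out : Option Int) : Prop := out = full_search_1_alt list_a list_b lower_bound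
instance (list_a : List Int) (list_b : List Int) (lower_bound : Int) (out : Option Int) : Decidable (Spec_full_search_1 list_a list_b lower_bound out) := by unfold Spec_full_search_1; infer_instance

-- ===== CLAIM (what is proved, stated in full; the proofs are below) =====
def Claim_equal_full_search_1 : Prop := ∀ (list_a : List Int) (list_b : List Int) (lower_bound : Int), Dom_full_search_1 list_a list_b lower_bound → Pre_full_search_1 list_a list_b lower_bound → Spec_full_search_1 list_a list_b lower_bound (full_search_1 list_a list_b lower_bound)

-- ===== LEMMAS AND PROOFS =====

-- option-min, the common shape of both running minima
def omin : Option Int → Option Int → Option Int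
  | s, none => s
  | none, some v => some v
  | some w, some v => some (min w v)

theorem omin_none (s : Option Int) : omin s none = s := by cases s <;> rfl

theorem omin_assoc (x y z : Option Int) : omin (omin x y) z = omin x (omin y z) := by
  cases x <;> cases y <;> cases z <;> simp [omin, min_assoc]

theorem omin_left_comm (s x y : Option Int) : omin (omin s x) y = omin (omin s y) x := by
  cases s <;> cases x <;> cases y <;> simp [omin, min_comm, min_left_comm]

-- generic: a fold of omin factors through the empty-start fold
theorem foldl_omin {β : Type} (g : β → Option Int) (l : List β) (s : Option Int) :
    l.foldl (fun s b => omin s (g b)) s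
      = omin s (l.foldl (fun s b => omin s (g b)) none) := by
  induction l generalizing s with
  | nil => simp [omin_none]
  | cons b l ih =>
      simp only [List.foldl_cons]
      rw [ih (omin s (g b)), ih (omin none (g b)), omin_assoc]
      cases g b <;> rfl

-- per-a candidate function of A's inner loop
def gcand (lower_bound elm_a : Int) (b : Int) : Option Int :=
  if elm_a + b < lower_bound then none else some (elm_a + b)

def Fg (lower_bound elm_a : Int) (l : List Int) : Option Int :=
  l.foldl (fun s b => omin s (gcand lower_bound elm_a b)) none

theorem innerA_eq (lower_bound elm_a : Int) (l : List Int) (s : Option Int) :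
    l.foldl (fun sum_value elm_b =>
      let t := elm_a + elm_b
      if t < lower_bound then sum_value
      else
        match sum_value with
        | none => some t
        | some v => if t < v then some t else sum_value) s
      = omin s (Fg lower_bound elm_a l) := by
  have hstep : (fun (sum_value : Option Int) (elm_b : Int) =>
      let t := elm_a + elm_b
      if t < lower_bound then sum_value
      else
        match sum_value with
        | none => some t
        | some v => if t < v then some t else sum_value)
      = fun s b => omin s (gcand lower_bound elm_a b) := by
    funext s b
    cases s with
    | none => simp only [gcand]; split <;> simp [omin]
    | some v =>
        simp only [gcand]
        split
        · simp [omin]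
        · simp only [omin]
          rcases lt_or_ge (elm_a + b) v with h | h
          · simp [h, min_eq_right (le_of_lt h)]
          · have h' : ¬ elm_a + b < v := not_lt.mpr h
            simp [h', min_eq_left h]
  rw [hstep, foldl_omin, Fg]

-- Fg is invariant under permutation of the scanned list
theorem Fg_perm (lower_bound elm_a : Int) {l₁ l₂ : List Int} (h : l₁.Perm l₂) :
    Fg lower_bound elm_a l₁ = Fg lower_bound elm_a l₂ := by
  induction h with
  | nil => rfl
  | cons x h ih =>
      simp only [Fg, List.foldl_cons] at *
      rw [foldl_omin _ _ (omin none (gcand lower_bound elm_a x)),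
          foldl_omin _ _ (omin none (gcand lower_bound elm_a x))]
      rw [ih]
  | swap x y l =>
      simp only [Fg, List.foldl_cons]
      rw [omin_left_comm]
  | trans _ _ ih₁ ih₂ => exact ih₁.trans ih₂

-- all elements below target contribute nothing
theorem Fg_none (lower_bound elm_a : Int) (l : List Int)
    (h : ∀ x ∈ l, x < lower_bound - elm_a) : Fg lower_bound elm_a l = none := by
  induction l with
  | nil => rfl
  | cons b l ih =>
      have hb : elm_a + b < lower_bound := by
        have := h b (by simp); omega
      simp only [Fg, List.foldl_cons, gcand, if_pos hb, omin_none]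
      exact ih (fun x hx => h x (by simp [hx]))

-- all elements ≥ target and ≥ the head's value: the fold keeps the head candidate
theorem Fg_head (lower_bound elm_a v : Int) (l : List Int)
    (h : ∀ x ∈ l, lower_bound - elm_a ≤ x ∧ v ≤ elm_a + x) :
    l.foldl (fun s b => omin s (gcand lower_bound elm_a b)) (some v) = some v := by
  induction l with
  | nil => rfl
  | cons b l ih =>
      have hb := h b (by simp)
      have h1 : ¬ elm_a + b < lower_bound := by omega
      simp only [List.foldl_cons, gcand, if_neg h1, omin, min_eq_left hb.2]
      exact ih (fun x hx => h x (by simp [hx]))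

-- Fg over appended lists
theorem Fg_append (lower_bound elm_a : Int) (l₁ l₂ : List Int) :
    Fg lower_bound elm_a (l₁ ++ l₂) = omin (Fg lower_bound elm_a l₁) (Fg lower_bound elm_a l₂) := by
  unfold Fg
  rw [List.foldl_append, foldl_omin]

-- binary-search invariant
theorem pvBsearch_spec (sb : List Int) (t : Int) (hs : sb.Pairwise (· ≤ ·)) :
    ∀ (lo hi : Nat), lo ≤ hi → hi ≤ sb.length →
      (∀ i, i < lo → sb.getD i 0 < t) →
      (∀ i, hi ≤ i → i < sb.length → t ≤ sb.getD i 0) →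
      (∀ i, i < pvBsearch sb t lo hi → sb.getD i 0 < t) ∧
      (∀ i, pvBsearch sb t lo hi ≤ i → i < sb.length → t ≤ sb.getD i 0) ∧
      pvBsearch sb t lo hi ≤ sb.length := by
  have mono : ∀ i j, i ≤ j → j < sb.length → sb.getD i 0 ≤ sb.getD j 0 := by
    intro i j hij hj
    rcases eq_or_lt_of_le hij with rfl | hlt
    · exact le_refl _
    · have hi : i < sb.length := lt_trans hlt hj
      rw [sb.getD_eq_getElem 0 hi, sb.getD_eq_getElem 0 hj]
      exact List.pairwise_iff_getElem.mp hs i j hi hj hlt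
  intro lo hi
  induction lo, hi using pvBsearch.induct sb t with
  | case1 lo hi h mid hlt ih =>
      intro hlohi hhile hbelow habove
      rw [pvBsearch, dif_pos h, if_pos hlt]
      refine ih (by omega) hhile ?_ habove
      intro i hi'
      calc sb.getD i 0 ≤ sb.getD mid 0 := mono i mid (by omega) (by omega)
        _ < t := hlt
  | case2 lo hi h mid hge ih =>
      intro hlohi hhile hbelow habove
      rw [pvBsearch, dif_pos h, if_neg hge]
      refine ih (by omega) (by omega) hbelow ?_
      intro i hmidi hile
      calc t ≤ sb.getD mid 0 := not_lt.mp hge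
        _ ≤ sb.getD i 0 := mono mid i hmidi hile
  | case3 lo hi h =>
      intro hlohi hhile hbelow habove
      rw [pvBsearch, dif_neg h]
      refine ⟨hbelow, ?_, by omega⟩
      intro i hi1 hi2
      exact habove i (by omega) hi2

-- the per-a key lemma: Fg over the sorted list equals B's binary-search candidate
theorem Fg_eq_cand (lower_bound elm_a : Int) (sb : List Int) (hs : sb.Pairwise (· ≤ ·)) :
    Fg lower_bound elm_a sb
      = (if pvBsearch sb (lower_bound - elm_a) 0 sb.length < sb.length
         then some (elm_a + sb.getD (pvBsearch sb (lower_bound - elm_a) 0 sb.length) 0)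
         else none) := by
  set t := lower_bound - elm_a with ht
  set r := pvBsearch sb t 0 sb.length with hr
  obtain ⟨hbelow, habove, hrle⟩ :=
    pvBsearch_spec sb t hs 0 sb.length (Nat.zero_le _) (le_refl _)
      (fun i hi => absurd hi (Nat.not_lt_zero i))
      (fun i hi hlt => absurd (lt_of_le_of_lt hi hlt) (lt_irrefl _))
  have hsplit : sb = sb.take r ++ sb.drop r := (List.take_append_drop r sb).symm
  have htake : Fg lower_bound elm_a (sb.take r) = none := by
    apply Fg_none
    intro x hx
    obtain ⟨i, hi, hxeq⟩ := List.mem_iff_getElem.mp hx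
    have hlt : i < min r sb.length := by simpa [List.length_take] using hi
    have hilen : i < sb.length := by omega
    have hir : i < r := by omega
    have hxv : x = sb[i] := by rw [← hxeq]; exact List.getElem_take
    have := hbelow i hir
    rw [sb.getD_eq_getElem 0 hilen] at this
    rw [hxv]; exact this
  by_cases hcase : r < sb.length
  · have hdrop : sb.drop r = sb[r] :: sb.drop (r + 1) := List.drop_eq_getElem_cons hcase
    have hhead : Fg lower_bound elm_a (sb.drop r) = some (elm_a + sb[r]) := by
      rw [hdrop]
      have hrge : t ≤ sb[r] := by
        have := habove r (le_refl r) hcase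
        rwa [sb.getD_eq_getElem 0 hcase] at this
      have h1 : ¬ elm_a + sb[r] < lower_bound := by omega
      simp only [Fg, List.foldl_cons, gcand, if_neg h1, omin]
      apply Fg_head
      intro x hx
      obtain ⟨i, hi, hxeq⟩ := List.mem_iff_getElem.mp hx
      have hilen : r + 1 + i < sb.length := by
        have := hi; simp [List.length_drop] at this; omega
      have hxval : x = sb[r + 1 + i] := by rw [← hxeq]; simp [List.getElem_drop]
      have hxge : t ≤ x := by
        have := habove (r + 1 + i) (by omega) hilen
        rw [sb.getD_eq_getElem 0 hilen] at this
        rw [hxval]; exact this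
      constructor
      · exact hxge
      · have : sb[r] ≤ sb[r + 1 + i] :=
          List.pairwise_iff_getElem.mp hs r (r + 1 + i) hcase hilen (by omega)
        rw [hxval]; omega
    rw [if_pos hcase]
    conv_lhs => rw [hsplit]
    rw [Fg_append, htake, hhead]
    rw [sb.getD_eq_getElem 0 hcase]
    rfl
  · have hreq : r = sb.length := le_antisymm hrle (not_lt.mp hcase)
    rw [if_neg hcase]
    conv_lhs => rw [hsplit]
    rw [Fg_append, htake, hreq, List.drop_length]
    rfl

-- ===== VERDICT (by name: the statement is the Claim_ definition above) =====
theorem full_search_1_spec : Claim_equal_full_search_1 := by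
  intro list_a list_b lower_bound _hdom _hpre
  unfold Spec_full_search_1 full_search_1 full_search_1_alt
  set sb := PySem.List.sorted list_b (fun x => x) false with hsb
  have hs : sb.Pairwise (· ≤ ·) := by
    simpa using PySem.List.sorted_pairwise list_b (fun x => x)
  have hperm : list_b.Perm sb := (PySem.List.sorted_perm list_b (fun x => x) false).symm
  -- rewrite A's fold into omin form
  have hA : (fun (sum_value : Option Int) (elm_a : Int) =>
        list_b.foldl (fun sum_value elm_b =>
          let t := elm_a + elm_b
          if t < lower_bound then sum_value
          else
            match sum_value with
            | none => some t
            | some v => if t < v then some t else sum_value) sum_value)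
      = fun s a => omin s (Fg lower_bound a list_b) := by
    funext s a
    exact innerA_eq lower_bound a list_b s
  -- rewrite B's fold into omin form
  have hB : (fun (best : Option Int) (elm_a : Int) =>
        let target := lower_bound - elm_a
        let lo := pvBsearch sb target 0 sb.length
        if lo < sb.length then
          let candidate := elm_a + sb.getD lo 0
          match best with
          | none => some candidate
          | some v => if candidate < v then some candidate else best
        else best)
      = fun s a => omin s (Fg lower_bound a list_b) := by
    funext s a
    have hkey : Fg lower_bound a list_b
        = (if pvBsearch sb (lower_bound - a) 0 sb.length < sb.length
           then some (a + sb.getD (pvBsearch sb (lower_bound - a) 0 sb.length) 0)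
           else none) := by
      rw [Fg_perm lower_bound a hperm]
      exact Fg_eq_cand lower_bound a sb hs
    dsimp only
    rw [hkey]
    by_cases hc : pvBsearch sb (lower_bound - a) 0 sb.length < sb.length
    · simp only [if_pos hc]
      cases s with
      | none => rfl
      | some v =>
          simp only [omin, List.getD]
          rcases lt_or_ge (a + sb[pvBsearch sb (lower_bound - a) 0 sb.length]?.getD 0) v with h | h
          · simp [h, min_eq_right (le_of_lt h)]
          · have h' : ¬ a + sb[pvBsearch sb (lower_bound - a) 0 sb.length]?.getD 0 < v := not_lt.mpr h
            simp [h', min_eq_left h]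
    · simp only [if_neg hc]
      exact (omin_none s).symm
  simp only [hA, hB]
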